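-- pv_equiv track=rewrite | github.com/LyudmilaMos/regular_expressions | phone_book.py | duplicates_persons_contacts
-- ===== SOURCE A (Python) =====
-- def duplicates_persons_contacts(data_contacts_list):
--     phone_book = dict()
--
--     for contact in data_contacts_list:
--
--         if contact[0] in phone_book:
--             contact_value = phone_book[contact[0]]
--
--             for i in range(len(contact_value)):
--
--                 if contact[i]:
--                     contact_value[i] = contact[i]
--         else:
--             phone_book[contact[0]] = contact
--
--     return list(phone_book.values())
-- ===== SOURCE B (Python) =====
-- def duplicates_persons_contacts(data_contacts_list):
--     # Group contacts by name (first-appearance order), then fold each group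
--     # into one merged record. Return-value equivalent to A; unlike A, B does
--     # not mutate the input contact lists in place.
--     groups = {}
--     for contact in data_contacts_list:
--         groups.setdefault(contact[0], []).append(contact)
--
--     def merge(base, contact):
--         return [contact[i] if contact[i] else base[i] for i in range(len(base))]
--
--     result = []
--     for group in groups.values():
--         merged = list(group[0])
--         for contact in group[1:]:
--             merged = merge(merged, contact)
--         result.append(merged)
--     return result
-- ===== Notes on version B (the rewrite author's own statement) =====
-- stated objective: alternative
-- what changed: A merges in a single pass by patching the record stored in the dict index-by-index in place; B first groups all contacts by name into an ordered dict of lists, then folds each group with a comprehension-based merge, building fresh lists (return-value equivalent; B does not mutate the input).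
import Mathlib
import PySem

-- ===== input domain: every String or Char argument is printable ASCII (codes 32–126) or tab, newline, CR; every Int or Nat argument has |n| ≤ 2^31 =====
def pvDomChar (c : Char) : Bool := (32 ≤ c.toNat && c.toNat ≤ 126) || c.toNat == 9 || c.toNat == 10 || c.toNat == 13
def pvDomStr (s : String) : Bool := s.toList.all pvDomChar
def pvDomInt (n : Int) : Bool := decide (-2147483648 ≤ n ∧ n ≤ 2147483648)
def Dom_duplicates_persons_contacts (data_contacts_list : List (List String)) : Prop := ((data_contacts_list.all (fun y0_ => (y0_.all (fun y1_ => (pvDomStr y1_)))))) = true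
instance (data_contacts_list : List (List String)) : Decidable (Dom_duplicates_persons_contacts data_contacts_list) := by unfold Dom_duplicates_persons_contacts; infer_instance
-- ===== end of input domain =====

-- B replaces A's single-pass dict of in-place-patched records by a group-then-fold
-- decomposition (alternative, same cost); A mutates the input contact lists in place,
-- B does not — the equivalence proved here is about the RETURN value only.

-- `contact[i]` for a Nat index; the `.getD ""` default is only taken outside Pre_
def pvIx (l : List String) (i : Nat) : String := (PySem.List.pyGet? l (i : Int)).getD ""
-- `contact[0]`; Pre_ guarantees every contact is nonempty
def pvKey (contact : List String) : String := (PySem.List.pyGet? contact 0).getD ""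

-- ===== PORT A =====
-- the inner `for i in range(len(contact_value)): if contact[i]: contact_value[i] = contact[i]`
def pvSetLoop (contact cv : List String) : List String :=
  (List.range cv.length).foldl
    (fun acc i => if pvIx contact i ≠ "" then acc.set i (pvIx contact i) else acc) cv

-- one iteration of A's loop over data_contacts_list (Python mutates the stored list
-- in place; with value semantics the patched record is reinserted at its key,
-- which keeps its dict position)
def pvStepA (pb : PySem.Dict String (List String)) (contact : List String) :
    PySem.Dict String (List String) :=
  match pb.get? (pvKey contact) with
  | some cv => pb.insert (pvKey contact) (pvSetLoop contact cv)
  | none    => pb.insert (pvKey contact) contact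

def duplicates_persons_contacts (data_contacts_list : List (List String)) : List (List String) :=
  (data_contacts_list.foldl pvStepA PySem.Dict.empty).values

-- ===== PORT B =====
-- `groups.setdefault(contact[0], []).append(contact)`
def pvStepB (g : PySem.Dict String (List (List String))) (contact : List String) :
    PySem.Dict String (List (List String)) :=
  g.modify (pvKey contact) [] (fun grp => grp ++ [contact])

-- `[contact[i] if contact[i] else base[i] for i in range(len(base))]`
def pvMerge (base contact : List String) : List String :=
  (List.range base.length).map
    (fun i => if pvIx contact i ≠ "" then pvIx contact i else pvIx base i)

-- `merged = list(group[0]); for contact in group[1:]: merged = merge(merged, contact)`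
def pvMergeGroup (group : List (List String)) : List String :=
  match group with
  | [] => []
  | h :: t => t.foldl (fun merged contact => pvMerge merged contact) h

def duplicates_persons_contacts_alt (data_contacts_list : List (List String)) : List (List String) :=
  ((data_contacts_list.foldl pvStepB PySem.Dict.empty).values).map pvMergeGroup

-- ===== PRECONDITION & SPEC =====
-- Pre_ excludes exactly the inputs where Python A raises: an empty contact (IndexError
-- on contact[0]), or a repeated name whose later contact is shorter than the first
-- contact carrying that name (IndexError on contact[i] in the merge loop). B raises
-- on exactly the same inputs.
def Pre_duplicates_persons_contacts (data_contacts_list : List (List String)) : Prop :=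
  ∀ i < data_contacts_list.length,
    (data_contacts_list.getD i []) ≠ [] ∧
    ∀ j < i,
      ((data_contacts_list.getD j []).head? = (data_contacts_list.getD i []).head? ∧
        ∀ k < j, (data_contacts_list.getD k []).head? ≠ (data_contacts_list.getD j []).head?) →
      (data_contacts_list.getD j []).length ≤ (data_contacts_list.getD i []).length

instance (data_contacts_list : List (List String)) : Decidable (Pre_duplicates_persons_contacts data_contacts_list) := by
  unfold Pre_duplicates_persons_contacts; infer_instance

def pvWitness_duplicates_persons_contacts : List (List String) :=
  [["alice", "111", ""], ["bob", "222"], ["alice", "", "x@y"]]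

def Spec_duplicates_persons_contacts (data_contacts_list : List (List String)) (out : List (List String)) : Prop := out = duplicates_persons_contacts_alt data_contacts_list
instance (data_contacts_list : List (List String)) (out : List (List String)) : Decidable (Spec_duplicates_persons_contacts data_contacts_list out) := by unfold Spec_duplicates_persons_contacts; infer_instance

-- ===== CLAIM (what is proved, stated in full; the proofs are below) =====
def Claim_equal_duplicates_persons_contacts : Prop := ∀ (data_contacts_list : List (List String)), Dom_duplicates_persons_contacts data_contacts_list → Pre_duplicates_persons_contacts data_contacts_list → Spec_duplicates_persons_contacts data_contacts_list (duplicates_persons_contacts data_contacts_list)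

-- ===== LEMMAS AND PROOFS =====

-- A's in-place index loop computes B's merge comprehension
theorem loopAux_length (c : List String) (n : Nat) (cv : List String) :
    ((List.range n).foldl
      (fun acc i => if pvIx c i ≠ "" then acc.set i (pvIx c i) else acc) cv).length
      = cv.length := by
  induction n generalizing cv with
  | zero => simp
  | succ n ih =>
    rw [List.range_succ, List.foldl_append]
    simp only [List.foldl_cons, List.foldl_nil]
    split
    · rw [List.length_set]; exact ih cv
    · exact ih cv

theorem loopAux_getElem? (c : List String) (n : Nat) (cv : List String)
    (hn : n ≤ cv.length) (j : Nat) :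
    ((List.range n).foldl
      (fun acc i => if pvIx c i ≠ "" then acc.set i (pvIx c i) else acc) cv)[j]?
      = if j < n ∧ pvIx c j ≠ "" then some (pvIx c j) else cv[j]? := by
  induction n generalizing j with
  | zero => simp
  | succ n ih =>
    rw [List.range_succ, List.foldl_append]
    simp only [List.foldl_cons, List.foldl_nil]
    by_cases hc : pvIx c n ≠ ""
    · rw [if_pos hc, List.getElem?_set, loopAux_length c n cv, ih (by omega)]
      by_cases hj : n = j
      · subst hj
        rw [if_pos rfl, if_pos (by omega : n < cv.length), if_pos ⟨by omega, hc⟩]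
      · rw [if_neg hj]
        split_ifs with h1 h2 h2
        · rfl
        · exact absurd ⟨by omega, h1.2⟩ h2
        · exact absurd ⟨by omega, h2.2⟩ h1
        · rfl
    · rw [if_neg hc, ih (by omega)]
      split_ifs with h1 h2 h2
      · rfl
      · exact absurd ⟨by omega, h1.2⟩ h2
      · rcases Nat.lt_succ_iff_lt_or_eq.mp h2.1 with h | h
        · exact absurd ⟨h, h2.2⟩ h1
        · subst h; exact absurd h2.2 (by simpa using hc)
      · rfl

theorem pvSetLoop_eq_merge (c cv : List String) : pvSetLoop c cv = pvMerge cv c := by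
  apply List.ext_getElem?
  intro j
  rw [pvSetLoop, loopAux_getElem? c cv.length cv le_rfl j]
  rw [pvMerge, List.getElem?_map]
  by_cases hj : j < cv.length
  · rw [List.getElem?_range hj]
    have hcv : cv[j]? = some cv[j] := List.getElem?_eq_getElem hj
    have hix : pvIx cv j = cv[j] := by
      simp [pvIx, PySem.List.pyGet?_natCast, hcv]
    by_cases hc : pvIx c j ≠ "" <;> simp [hj, hc, hix]
  · simp [pvIx, hj]

theorem pvMergeGroup_append (g : List (List String)) (c : List String) (hg : g ≠ []) :
    pvMergeGroup (g ++ [c]) = pvMerge (pvMergeGroup g) c := by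
  cases g with
  | nil => exact absurd rfl hg
  | cons h t => simp [pvMergeGroup, List.foldl_append]

-- the simulation relation between A's dict of merged records and B's dict of groups
def pvMapMG (g : PySem.Dict String (List (List String))) : PySem.Dict String (List String) :=
  PySem.Dict.mk (g.items.map (fun p => (p.1, pvMergeGroup p.2)))

theorem get?_pvMapMG (g : PySem.Dict String (List (List String))) (k : String) :
    (pvMapMG g).get? k = (g.get? k).map pvMergeGroup := by
  simp [pvMapMG, PySem.Dict.get?, List.find?_map, Function.comp_def, Option.map_map]

theorem contains_pvMapMG (g : PySem.Dict String (List (List String))) (k : String) :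
    (pvMapMG g).contains k = g.contains k := by
  simp [pvMapMG, PySem.Dict.contains, List.any_map, Function.comp_def]

theorem values_pvMapMG (g : PySem.Dict String (List (List String))) :
    (pvMapMG g).values = g.values.map pvMergeGroup := by
  simp [pvMapMG, PySem.Dict.values, List.map_map, Function.comp_def]

theorem pvStepAB (g : PySem.Dict String (List (List String))) (c : List String)
    (hne : ∀ p ∈ g.items, p.2 ≠ []) :
    pvStepA (pvMapMG g) c = pvMapMG (pvStepB g c) := by
  cases hg : g.get? (pvKey c) with
  | none =>
    have hcon : g.contains (pvKey c) = false := by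
      rw [PySem.Dict.contains_eq_isSome_get?, hg]; rfl
    have hgd : g.getD (pvKey c) [] = [] := PySem.Dict.getD_of_not_contains _ _ hcon
    rw [pvStepA, get?_pvMapMG, hg]
    simp only [Option.map_none]
    apply PySem.Dict.ext
    rw [pvStepB, PySem.Dict.modify, hgd]
    rw [PySem.Dict.items_insert_of_not_contains _ _ ((contains_pvMapMG g (pvKey c)).trans hcon)]
    simp only [pvMapMG]
    rw [PySem.Dict.items_insert_of_not_contains _ _ hcon]
    simp [pvMergeGroup]
  | some gr =>
    have hcon : g.contains (pvKey c) = true := by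
      rw [PySem.Dict.contains_eq_isSome_get?, hg]; rfl
    have hgd : g.getD (pvKey c) [] = gr := PySem.Dict.getD_of_get?_eq_some _ _ hg
    have hgrne : gr ≠ [] := by
      have : (pvKey c, gr) ∈ g.items := PySem.Dict.mem_items_of_get?_eq_some _ hg
      exact hne _ this
    rw [pvStepA, get?_pvMapMG, hg]
    simp only [Option.map_some]
    apply PySem.Dict.ext
    rw [pvStepB, PySem.Dict.modify, hgd]
    rw [PySem.Dict.items_insert_of_contains _ _ ((contains_pvMapMG g (pvKey c)).trans hcon)]
    simp only [pvMapMG]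
    rw [PySem.Dict.items_insert_of_contains _ _ hcon]
    simp only [List.map_map]
    apply List.map_congr_left
    intro p _
    by_cases hk : p.1 = pvKey c
    · simp [hk, pvMergeGroup_append gr c hgrne, pvSetLoop_eq_merge]
    · simp [hk]

theorem pvStepB_ne (g : PySem.Dict String (List (List String))) (c : List String)
    (hne : ∀ p ∈ g.items, p.2 ≠ []) :
    ∀ p ∈ (pvStepB g c).items, p.2 ≠ [] := by
  intro p hp
  rw [pvStepB, PySem.Dict.modify, PySem.Dict.insert] at hp
  split at hp
  · simp only [List.mem_map] at hp
    obtain ⟨q, hq, rfl⟩ := hp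
    split
    · simp
    · exact hne _ hq
  · simp only [List.mem_append, List.mem_singleton] at hp
    cases hp with
    | inl h => exact hne _ h
    | inr h => subst h; simp

theorem pvFoldAB (l : List (List String)) (g : PySem.Dict String (List (List String)))
    (hne : ∀ p ∈ g.items, p.2 ≠ []) :
    l.foldl pvStepA (pvMapMG g) = pvMapMG (l.foldl pvStepB g) := by
  induction l generalizing g with
  | nil => rfl
  | cons c t ih =>
    simp only [List.foldl_cons]
    rw [pvStepAB g c hne]
    exact ih _ (pvStepB_ne g c hne)

-- ===== VERDICT (by name: the statement is the Claim_ definition above) =====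
theorem duplicates_persons_contacts_spec : Claim_equal_duplicates_persons_contacts := by
  intro l _ _
  unfold Spec_duplicates_persons_contacts
  unfold duplicates_persons_contacts duplicates_persons_contacts_alt
  have hempty : (PySem.Dict.empty : PySem.Dict String (List String)) = pvMapMG PySem.Dict.empty := rfl
  rw [hempty, pvFoldAB l PySem.Dict.empty (by intro p hp; simp [PySem.Dict.empty] at hp),
    values_pvMapMG]
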